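-- pv_equiv track=rewrite | github.com/vharatian/AgentCheck-M | prompt_code/main.py | _page_type
-- ===== SOURCE A (Python) =====
-- def _page_type(url: str, title: str | None, text: str) -> str:
--     u = url.lower()
--     t = (title or "").lower()
--     x = (text or "").lower()
--
--     if any(k in u for k in ["/privacy", "/terms", "/legal", "impressum"]) or any(k in x for k in ["privacy", "terms of", "legal notice"]):
--         return "policy"
--     if "pricing" in u or "pricing" in t or "pricing" in x:
--         return "pricing"
--     if any(k in u for k in ["/help", "/support", "/contact", "/faq"]) or any(k in x for k in ["help center", "support", "contact us", "faq"]):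
--         return "support"
--     if any(k in u for k in ["/docs", "/documentation", "/developer"]) or any(k in x for k in ["documentation", "api reference", "developer guide"]):
--         return "docs"
--     if any(k in x for k in ["search", "filter", "sort by"]):
--         return "search_or_listing"
--     if len(x) > 2000:
--         return "article_or_detail"
--     return "general"
-- ===== SOURCE B (Python) =====
-- _LABELS = ["policy", "pricing", "support", "docs", "search_or_listing"]
--
-- # flat pattern table: (field index into (u, t, x), keyword, rank); rank indexes _LABELS
-- _PATTERNS = [
--     (0, "/privacy", 0), (0, "/terms", 0), (0, "/legal", 0), (0, "impressum", 0),
--     (2, "privacy", 0), (2, "terms of", 0), (2, "legal notice", 0),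
--     (0, "pricing", 1), (1, "pricing", 1), (2, "pricing", 1),
--     (0, "/help", 2), (0, "/support", 2), (0, "/contact", 2), (0, "/faq", 2),
--     (2, "help center", 2), (2, "support", 2), (2, "contact us", 2), (2, "faq", 2),
--     (0, "/docs", 3), (0, "/documentation", 3), (0, "/developer", 3),
--     (2, "documentation", 3), (2, "api reference", 3), (2, "developer guide", 3),
--     (2, "search", 4), (2, "filter", 4), (2, "sort by", 4),
-- ]
--
--
-- def _page_type(url, title, text):
--     fields = (url.lower(), (title or "").lower(), text.lower())
--     best = None
--     for f, kw, rank in _PATTERNS: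
--         if kw in fields[f]:
--             best = rank if best is None else min(best, rank)
--     if best is not None:
--         return _LABELS[best]
--     return "article_or_detail" if len(fields[2]) > 2000 else "general"
-- ===== Notes on version B (the rewrite author's own statement) =====
-- stated objective: alternative
-- what changed: Replaced the early-return chain of keyword branches by a single pass over a flat (field, keyword, rank) pattern table that accumulates the minimum matched rank, then maps that rank to its label, keeping the len>2000 fallback when no pattern matched.
import Mathlib
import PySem

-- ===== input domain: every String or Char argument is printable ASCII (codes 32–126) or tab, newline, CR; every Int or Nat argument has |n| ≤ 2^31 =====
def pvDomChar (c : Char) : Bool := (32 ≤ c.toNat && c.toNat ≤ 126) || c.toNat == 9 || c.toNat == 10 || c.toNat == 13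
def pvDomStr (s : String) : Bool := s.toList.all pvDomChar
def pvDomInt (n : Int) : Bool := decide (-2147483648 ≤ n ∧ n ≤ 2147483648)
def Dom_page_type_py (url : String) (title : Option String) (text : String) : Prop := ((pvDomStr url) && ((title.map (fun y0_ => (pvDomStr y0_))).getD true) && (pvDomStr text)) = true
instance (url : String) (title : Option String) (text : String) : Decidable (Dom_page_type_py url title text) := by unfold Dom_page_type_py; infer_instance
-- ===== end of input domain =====

-- B replaces A's early-return branch chain by a different algorithm: one pass over a flat
-- (field, keyword, rank) pattern table accumulating the MINIMUM matched rank, then a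
-- rank -> label table lookup, with the len>2000 fallback when nothing matched (objective: alternative).


-- ===== PORT A =====
def page_type_py (url : String) (title : Option String) (text : String) : String :=
  let u := PySem.Str.lower url
  let t := PySem.Str.lower (title.getD "")
  let x := PySem.Str.lower text
  if ["/privacy", "/terms", "/legal", "impressum"].any (fun k => PySem.Str.isIn k u)
     || ["privacy", "terms of", "legal notice"].any (fun k => PySem.Str.isIn k x) then "policy"
  else if PySem.Str.isIn "pricing" u || PySem.Str.isIn "pricing" t || PySem.Str.isIn "pricing" x then "pricing"
  else if ["/help", "/support", "/contact", "/faq"].any (fun k => PySem.Str.isIn k u)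
     || ["help center", "support", "contact us", "faq"].any (fun k => PySem.Str.isIn k x) then "support"
  else if ["/docs", "/documentation", "/developer"].any (fun k => PySem.Str.isIn k u)
     || ["documentation", "api reference", "developer guide"].any (fun k => PySem.Str.isIn k x) then "docs"
  else if ["search", "filter", "sort by"].any (fun k => PySem.Str.isIn k x) then "search_or_listing"
  else if PySem.Str.len x > 2000 then "article_or_detail"
  else "general"

-- ===== PORT B =====
def pvLabels : List String := ["policy", "pricing", "support", "docs", "search_or_listing"]

def pvPatterns : List (Nat × String × Nat) :=
  [ (0, "/privacy", 0), (0, "/terms", 0), (0, "/legal", 0), (0, "impressum", 0),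
    (2, "privacy", 0), (2, "terms of", 0), (2, "legal notice", 0),
    (0, "pricing", 1), (1, "pricing", 1), (2, "pricing", 1),
    (0, "/help", 2), (0, "/support", 2), (0, "/contact", 2), (0, "/faq", 2),
    (2, "help center", 2), (2, "support", 2), (2, "contact us", 2), (2, "faq", 2),
    (0, "/docs", 3), (0, "/documentation", 3), (0, "/developer", 3),
    (2, "documentation", 3), (2, "api reference", 3), (2, "developer guide", 3),
    (2, "search", 4), (2, "filter", 4), (2, "sort by", 4) ]

-- fields[f] of Source B (tuple indexing with a constant in-range index)
def pvSel (fs : String × String × String) (f : Nat) : String :=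
  match f with
  | 0 => fs.1
  | 1 => fs.2.1
  | _ => fs.2.2

-- loop body: best = rank if best is None else min(best, rank), guarded by the match test
def pvUpd (b : Bool) (r : Nat) (acc : Option Nat) : Option Nat :=
  if b then some (match acc with | none => r | some v => min v r) else acc

def page_type_py_alt (url : String) (title : Option String) (text : String) : String :=
  let fs := (PySem.Str.lower url, PySem.Str.lower (title.getD ""), PySem.Str.lower text)
  let best := pvPatterns.foldl
    (fun acc p => pvUpd (PySem.Str.isIn p.2.1 (pvSel fs p.1)) p.2.2 acc) none
  match best with
  | some b => pvLabels.getD b ""   -- _LABELS[best]; best is always in range 0..4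
  | none => if PySem.Str.len fs.2.2 > 2000 then "article_or_detail" else "general"

-- ===== PRECONDITION & SPEC =====
def Spec_page_type_py (url : String) (title : Option String) (text : String) (out : String) : Prop := out = page_type_py_alt url title text
instance (url : String) (title : Option String) (text : String) (out : String) : Decidable (Spec_page_type_py url title text out) := by unfold Spec_page_type_py; infer_instance

-- ===== CLAIM =====
def Claim_equal_page_type_py : Prop := ∀ (url : String) (title : Option String) (text : String), Dom_page_type_py url title text → Spec_page_type_py url title text (page_type_py url title text)

-- ===== LEMMAS AND PROOFS =====

-- two consecutive updates at the same rank collapse to one update on the disjunction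
theorem pvUpd_merge (b c : Bool) (r : Nat) (acc : Option Nat) :
    pvUpd c r (pvUpd b r acc) = pvUpd (b || c) r acc := by
  cases b <;> cases c <;> cases acc <;> simp [pvUpd]

-- the branch chain equals min-rank selection, for abstract per-rule match booleans
theorem pvFinal (m0 m1 m2 m3 m4 : Bool) (big : Prop) [Decidable big] :
    (if m0 then "policy"
     else if m1 then "pricing"
     else if m2 then "support"
     else if m3 then "docs"
     else if m4 then "search_or_listing"
     else if big then "article_or_detail" else "general")
    = (match pvUpd m4 4 (pvUpd m3 3 (pvUpd m2 2 (pvUpd m1 1 (pvUpd m0 0 none)))) with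
       | some b => pvLabels.getD b ""
       | none => if big then "article_or_detail" else "general") := by
  cases m0 <;> cases m1 <;> cases m2 <;> cases m3 <;> cases m4 <;> rfl

-- ===== VERDICT =====
theorem page_type_py_spec : Claim_equal_page_type_py := by
  intro url title text _
  unfold Spec_page_type_py page_type_py page_type_py_alt
  simp only [pvPatterns, List.foldl_cons, List.foldl_nil, pvSel, List.any_cons, List.any_nil,
    Bool.or_false, pvUpd_merge, Bool.or_assoc]
  exact pvFinal _ _ _ _ _ _
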